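-- pv_equiv track=rewrite | github.com/dbarbozasoares/Python-Personal | PracticePython/PracticeNode/exercises_12_02_2024.py | check_has_all_indexes
-- ===== SOURCE A (Python) =====
-- def check_has_all_indexes(numbers):
--     size = len(numbers[1])
--     check = {}
--
--     for a in numbers:
--         for i in range(1,size+1):
--             check[i] = 0
--         for b in a:
--             if b in check:
--                 check[b]+=1
--         for key, value in check.items():
--             if value == 0:
--                 return False
--
--     return True
-- ===== SOURCE B (Python) =====
-- def check_has_all_indexes(numbers):
--     size = len(numbers[1])
--     common = set(numbers[0])
--     for row in numbers[1:]:
--         common &= set(row)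
--     return all(k in common for k in range(1, size + 1))
-- ===== Notes on version B (the rewrite author's own statement) =====
-- stated objective: alternative
-- what changed: Instead of A's per-row rebuilt count dictionary with three inner loops (reset, count, zero-scan), B first intersects all rows into one common set in a single pass and then makes one final check that every index 1..size lies in that intersection (loop interchange: rows-then-indexes becomes intersect-rows-then-indexes).
import Mathlib
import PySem

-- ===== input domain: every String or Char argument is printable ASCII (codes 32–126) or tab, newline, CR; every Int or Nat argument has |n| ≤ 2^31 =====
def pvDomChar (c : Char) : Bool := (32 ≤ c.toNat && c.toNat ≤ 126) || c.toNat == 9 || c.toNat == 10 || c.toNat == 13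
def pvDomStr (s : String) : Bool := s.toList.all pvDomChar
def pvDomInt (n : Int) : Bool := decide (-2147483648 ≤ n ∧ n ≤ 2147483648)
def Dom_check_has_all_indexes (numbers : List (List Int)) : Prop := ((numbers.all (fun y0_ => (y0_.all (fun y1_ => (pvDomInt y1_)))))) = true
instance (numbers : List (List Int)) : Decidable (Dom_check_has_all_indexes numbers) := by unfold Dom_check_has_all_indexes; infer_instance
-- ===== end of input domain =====

-- B replaces A's per-row count dictionary (reset loop, counting loop, zero-scan loop)
-- by intersecting all rows into one common set and then checking 1..size against that
-- intersection once (objective: alternative).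

-- ===== PORT A =====
-- for i in range(1, size+1): check[i] = 0
def pvResetA (size : Int) (check : PySem.Dict Int Int) : PySem.Dict Int Int :=
  (PySem.List.pyRange 1 (size + 1) 1).foldl (fun c i => c.insert i 0) check

-- for b in a: if b in check: check[b] += 1
def pvCountA (a : List Int) (check : PySem.Dict Int Int) : PySem.Dict Int Int :=
  a.foldl (fun c b => if c.contains b then c.modify b 0 (· + 1) else c) check

-- the outer 'for a in numbers' loop with its early 'return False' on a zero value
def pvLoopA (size : Int) : List (List Int) → PySem.Dict Int Int → Bool
  | [], _ => true
  | a :: rest, check =>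
      let c := pvCountA a (pvResetA size check)
      if c.items.any (fun kv => kv.2 == 0) then false else pvLoopA size rest c

def check_has_all_indexes (numbers : List (List Int)) : Bool :=
  match PySem.List.pyGet? numbers 1 with
  | none => false  -- Python raises IndexError at numbers[1]; excluded by Pre_
  | some row => pvLoopA (row.length : Int) numbers PySem.Dict.empty

-- ===== PORT B =====
def check_has_all_indexes_alt (numbers : List (List Int)) : Bool :=
  match PySem.List.pyGet? numbers 1 with
  | none => false  -- Python raises IndexError at numbers[1]; excluded by Pre_
  | some row1 =>
      match numbers with
      | [] => false  -- unreachable: numbers[1] existed above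
      | r0 :: rest =>
          -- common = set(numbers[0]); for row in numbers[1:]: common &= set(row)
          let common : PySem.Set Int :=
            rest.foldl (fun s r => PySem.Set.inter s (PySem.Set.ofList r)) (PySem.Set.ofList r0)
          (PySem.List.pyRange 1 ((row1.length : Int) + 1) 1).all
            (fun k => PySem.Set.contains common k)

-- ===== PRECONDITION & SPEC =====
-- Pre_ excludes exactly the inputs with fewer than two rows, on which both A and B raise IndexError at numbers[1].
def Pre_check_has_all_indexes (numbers : List (List Int)) : Prop := 2 ≤ numbers.length
instance (numbers : List (List Int)) : Decidable (Pre_check_has_all_indexes numbers) := by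
  unfold Pre_check_has_all_indexes; infer_instance

def pvWitness_check_has_all_indexes : List (List Int) := [[1, 2], [2, 1, 5]]

def Spec_check_has_all_indexes (numbers : List (List Int)) (out : Bool) : Prop := out = check_has_all_indexes_alt numbers
instance (numbers : List (List Int)) (out : Bool) : Decidable (Spec_check_has_all_indexes numbers out) := by
  unfold Spec_check_has_all_indexes; infer_instance

-- ===== CLAIM (what is proved, stated in full; the proofs are below) =====
def Claim_equal_check_has_all_indexes : Prop := ∀ (numbers : List (List Int)), Dom_check_has_all_indexes numbers → Pre_check_has_all_indexes numbers → Spec_check_has_all_indexes numbers (check_has_all_indexes numbers)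

-- ===== LEMMAS AND PROOFS =====

-- the reset loop sets every key of l to 0 and leaves other keys alone
theorem pv_getD_reset (l : List Int) (d : PySem.Dict Int Int) (k : Int) :
    ((l.foldl (fun c i => c.insert i 0) d).getD k 0) = if k ∈ l then 0 else d.getD k 0 := by
  induction l generalizing d with
  | nil => simp
  | cons i l ih =>
      simp only [List.foldl_cons, ih, PySem.Dict.getD_insert, List.mem_cons]
      split_ifs with h1 h2 h3 h4 <;> simp_all

-- the counting loop preserves the key set
theorem pv_keys_count (a : List Int) (d : PySem.Dict Int Int) :
    (pvCountA a d).keys = d.keys := by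
  induction a generalizing d with
  | nil => rfl
  | cons b a ih =>
      have hstep : pvCountA (b :: a) d
          = pvCountA a (if d.contains b then d.modify b 0 (· + 1) else d) := by
        unfold pvCountA; rw [List.foldl_cons]
      rw [hstep]
      by_cases hb : d.contains b
      · rw [if_pos hb, ih, PySem.Dict.keys_modify,
            PySem.Dict.keys_insert_of_contains _ _ hb]
      · rw [if_neg hb, ih]

-- the counting loop adds the occurrence count of k to every existing key k
theorem pv_getD_count (a : List Int) (d : PySem.Dict Int Int) (k : Int) :
    (pvCountA a d).getD k 0 =
      if d.contains k then d.getD k 0 + a.count k else d.getD k 0 := by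
  induction a generalizing d with
  | nil => simp [pvCountA]
  | cons b a ih =>
      have hstep : pvCountA (b :: a) d
          = pvCountA a (if d.contains b then d.modify b 0 (· + 1) else d) := by
        unfold pvCountA; rw [List.foldl_cons]
      rw [hstep]
      by_cases hb : d.contains b
      · rw [if_pos hb, ih, PySem.Dict.contains_modify, PySem.Dict.getD_modify]
        by_cases hk : k = b
        · subst hk
          simp only [BEq.rfl, Bool.true_or, if_true, hb,
            List.count_cons_self]
          push_cast
          ring
        · have h1 : (k == b || d.contains k) = d.contains k := by
            simp [hk]
          rw [h1]
          simp [hk, Ne.symm hk]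
      · rw [if_neg hb, ih]
        by_cases hk : k = b
        · subst hk
          simp [hb]
        · simp [Ne.symm hk]

-- resetting a dict whose keys are [] or exactly the range yields keys = range
theorem pv_keys_reset (size : Int) (check : PySem.Dict Int Int)
    (h : check.keys = [] ∨ check.keys = PySem.List.pyRange 1 (size + 1) 1) :
    (pvResetA size check).keys = PySem.List.pyRange 1 (size + 1) 1 := by
  unfold pvResetA
  rw [PySem.Dict.keys_foldl_insert]
  rcases h with h | h <;> rw [h]
  · rw [PySem.Set.update_nil_left,
        PySem.Set.ofList_eq_self_of_nodup _ (PySem.List.nodup_pyRange_one 1 (size + 1))]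
  · rw [PySem.Set.update_eq_append_filter]
    have hf : ∀ y ∈ PySem.Set.ofList (PySem.List.pyRange 1 (size + 1) 1),
        (!PySem.Set.contains (PySem.List.pyRange 1 (size + 1) 1) y) = false := by
      intro y hy
      simp only [Bool.not_eq_false', PySem.Set.contains_eq_listContains]
      simpa using (PySem.Set.mem_ofList _ _).mp hy
    rw [List.filter_eq_nil_iff.mpr (by intro y hy; simpa using hf y hy)]
    simp

-- one row of A's loop flags a zero exactly when some k in 1..size is missing from a
theorem pv_row (size : Int) (a : List Int) (check : PySem.Dict Int Int)
    (h : check.keys = [] ∨ check.keys = PySem.List.pyRange 1 (size + 1) 1) :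
    ((pvCountA a (pvResetA size check)).items.any (fun kv => kv.2 == 0))
      = !((PySem.List.pyRange 1 (size + 1) 1).all (fun k => decide (k ∈ a))) := by
  have hk : (pvCountA a (pvResetA size check)).keys = PySem.List.pyRange 1 (size + 1) 1 := by
    rw [pv_keys_count]; exact pv_keys_reset size check h
  have hnd : (pvCountA a (pvResetA size check)).keys.Nodup := by
    rw [hk]; exact PySem.List.nodup_pyRange_one 1 (size + 1)
  have hval : ∀ k ∈ PySem.List.pyRange 1 (size + 1) 1,
      (pvCountA a (pvResetA size check)).getD k 0 = (a.count k : Int) := by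
    intro k hkmem
    have hcont : (pvResetA size check).contains k := by
      rw [PySem.Dict.contains_iff_mem_keys, pv_keys_reset size check h]; exact hkmem
    rw [pv_getD_count, if_pos hcont]
    unfold pvResetA
    rw [pv_getD_reset, if_pos (by simpa using hkmem)]
    simp
  rw [PySem.Dict.items_eq_map_keys _ hnd 0, hk, List.any_map,
      List.all_eq_not_any_not, Bool.not_not]
  apply PySem.List.any_congr_mem
  intro k hkm
  simp only [Function.comp]
  rw [hval k hkm]
  by_cases hmem : k ∈ a
  · have : a.count k ≠ 0 := by simpa [List.count_eq_zero] using hmem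
    simp [hmem, this]
  · simp [hmem, List.count_eq_zero.mpr hmem]

-- A's outer loop equals the all-rows membership test
theorem pv_loop (size : Int) (rows : List (List Int)) (check : PySem.Dict Int Int)
    (h : check.keys = [] ∨ check.keys = PySem.List.pyRange 1 (size + 1) 1) :
    pvLoopA size rows check
      = rows.all (fun r => (PySem.List.pyRange 1 (size + 1) 1).all (fun k => decide (k ∈ r))) := by
  induction rows generalizing check with
  | nil => rfl
  | cons a rest ih =>
      rw [pvLoopA, List.all_cons]
      simp only [pv_row size a check h]
      by_cases hrow : (PySem.List.pyRange 1 (size + 1) 1).all (fun k => decide (k ∈ a)) = true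
      · rw [hrow]
        simp only [Bool.not_true, Bool.true_and]
        apply ih
        right
        rw [pv_keys_count]; exact pv_keys_reset size check h
      · simp only [Bool.not_eq_true] at hrow
        rw [hrow]
        simp

-- membership in the folded intersection = membership in the carrier set and in every row
theorem pv_mem_interFold (rows : List (List Int)) (s : PySem.Set Int) (k : Int) :
    (k ∈ rows.foldl (fun s r => PySem.Set.inter s (PySem.Set.ofList r)) s)
      ↔ k ∈ s ∧ ∀ r ∈ rows, k ∈ r := by
  induction rows generalizing s with
  | nil => simp
  | cons r rows ih =>
      rw [List.foldl_cons, ih]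
      simp only [PySem.Set.mem_inter, PySem.Set.mem_ofList, List.mem_cons]
      constructor
      · rintro ⟨⟨hs, hr⟩, hall⟩
        exact ⟨hs, by rintro x (rfl | hx); exact hr; exact hall x hx⟩
      · rintro ⟨hs, hall⟩
        exact ⟨⟨hs, hall r (Or.inl rfl)⟩, fun x hx => hall x (Or.inr hx)⟩

-- ===== VERDICT (by name: the statement is the Claim_ definition above) =====
theorem check_has_all_indexes_spec : Claim_equal_check_has_all_indexes := by
  intro numbers _hdom hpre
  unfold Pre_check_has_all_indexes at hpre
  unfold Spec_check_has_all_indexes check_has_all_indexes check_has_all_indexes_alt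
  obtain ⟨row, hrow⟩ : ∃ row, PySem.List.pyGet? numbers 1 = some row := by
    refine ⟨numbers[1], ?_⟩
    rw [show (1 : Int) = ((1 : Nat) : Int) from rfl,
        PySem.List.pyGet?_natCast numbers 1,
        List.getElem?_eq_getElem (by omega : 1 < numbers.length)]
    rfl
  rw [hrow]
  obtain ⟨r0, rest, rfl⟩ : ∃ r0 rest, numbers = r0 :: rest := by
    cases numbers with
    | nil => simp at hpre
    | cons a b => exact ⟨a, b, rfl⟩
  dsimp only
  rw [pv_loop _ _ _ (Or.inl rfl)]
  rw [Bool.eq_iff_iff]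
  simp only [List.all_eq_true, List.mem_cons, decide_eq_true_eq,
    PySem.Set.contains_iff, pv_mem_interFold, PySem.Set.mem_ofList]
  constructor
  · intro h k hk
    exact ⟨(h r0 (Or.inl rfl)) k hk, fun r hr => (h r (Or.inr hr)) k hk⟩
  · rintro h r (rfl | hr) k hk
    · exact (h k hk).1
    · exact (h k hk).2 r hr
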